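-- pv_equiv track=rewrite | github.com/XinnuoXu/MiRANews | newsroom/check_fact_coverage_debug.py | cut_by_length
-- ===== SOURCE A (Python) =====
-- def cut_by_length(doc, max_length):
--     sents = doc.split('\t')
--     new_doc = []; length = 0
--     for line in sents:
--         flist = line.split()
--         length += len(flist)
--         if length < max_length:
--             new_doc.append(line)
--     return '\t'.join(new_doc)
-- ===== SOURCE B (Python) =====
-- def cut_by_length(doc, max_length):
--     # Stage 1: prefix-sum table of word counts (non-decreasing).
--     # Stage 2: binary search for the first entry >= max_length; the kept
--     # lines are exactly that prefix, returned as one slice.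
--     sents = doc.split('\t')
--     cums = []
--     total = 0
--     for line in sents:
--         total += len(line.split())
--         cums.append(total)
--     lo, hi = 0, len(cums)
--     while lo < hi:
--         mid = (lo + hi) // 2
--         if cums[mid] < max_length:
--             lo = mid + 1
--         else:
--             hi = mid
--     return '\t'.join(sents[:lo])
-- ===== Notes on version B (the rewrite author's own statement) =====
-- stated objective: alternative
-- what changed: B builds an explicit prefix-sum table of word counts and then locates the cut point by binary search over that monotone table, returning a single prefix slice, instead of A's one-pass accumulate-and-filter loop.
import Mathlib
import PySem

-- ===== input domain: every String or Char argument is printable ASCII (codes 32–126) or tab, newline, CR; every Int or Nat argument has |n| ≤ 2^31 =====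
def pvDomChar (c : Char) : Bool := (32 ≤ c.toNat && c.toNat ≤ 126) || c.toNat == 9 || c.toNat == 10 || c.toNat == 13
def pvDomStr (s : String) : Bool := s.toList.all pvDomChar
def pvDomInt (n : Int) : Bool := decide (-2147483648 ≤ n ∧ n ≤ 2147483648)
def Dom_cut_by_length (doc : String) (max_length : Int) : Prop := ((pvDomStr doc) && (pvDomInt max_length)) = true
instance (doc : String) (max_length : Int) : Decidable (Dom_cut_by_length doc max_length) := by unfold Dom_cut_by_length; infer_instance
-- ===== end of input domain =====

-- B replaces A's accumulate-and-filter loop by a prefix-sum table plus a binary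
-- search for the cut point over that monotone table (alternative decomposition).

-- ===== PORT A =====
def cut_by_length (doc : String) (max_length : Int) : String :=
  let sents := (PySem.Str.split? doc "\t").getD []
  let st := sents.foldl
    (fun (st : List String × Int) line =>
      let flist := PySem.Str.split₀ line
      let length := st.2 + (flist.length : Int)
      if length < max_length then (st.1 ++ [line], length) else (st.1, length))
    ([], 0)
  PySem.Str.join "\t" st.1

-- ===== PORT B =====
-- the while-loop: binary search for the first index with cums[i] ≥ max_length.
-- cums[mid] is ported as getD mid 0: mid is always in range (lo ≤ mid < hi ≤ len).
def bsearch (m : Int) (cums : List Int) (lo hi : Nat) : Nat :=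
  if h : lo < hi then
    let mid := (lo + hi) / 2
    if cums.getD mid 0 < m then bsearch m cums (mid + 1) hi else bsearch m cums lo mid
  else lo
termination_by hi - lo
decreasing_by all_goals omega

def cut_by_length_alt (doc : String) (max_length : Int) : String :=
  let sents := (PySem.Str.split? doc "\t").getD []
  let cums := (sents.foldl
    (fun (st : List Int × Int) line =>
      let total := st.2 + ((PySem.Str.split₀ line).length : Int)
      (st.1 ++ [total], total)) ([], 0)).1
  let lo := bsearch max_length cums 0 cums.length
  PySem.Str.join "\t" (PySem.List.slice sents none (some (lo : Int)))

-- ===== PRECONDITION & SPEC =====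
def Spec_cut_by_length (doc : String) (max_length : Int) (out : String) : Prop := out = cut_by_length_alt doc max_length
instance (doc : String) (max_length : Int) (out : String) : Decidable (Spec_cut_by_length doc max_length out) := by unfold Spec_cut_by_length; infer_instance

-- ===== CLAIM (what is proved, stated in full; the proofs are below) =====
def Claim_equal_cut_by_length : Prop := ∀ (doc : String) (max_length : Int), Dom_cut_by_length doc max_length → Spec_cut_by_length doc max_length (cut_by_length doc max_length)

-- ===== LEMMAS AND PROOFS =====

-- A's loop body, abbreviated
def stepA (m : Int) (st : List String × Int) (line : String) : List String × Int :=
  let length := st.2 + ((PySem.Str.split₀ line).length : Int)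
  if length < m then (st.1 ++ [line], length) else (st.1, length)

-- the prefix-sum table built by B's first loop, as a structural recursion
def cumsFrom (t : Int) : List String → List Int
  | [] => []
  | line :: rest =>
      let t' := t + ((PySem.Str.split₀ line).length : Int)
      t' :: cumsFrom t' rest

-- the cut point both programs realise: how many prefix sums are < m
def kf (m t : Int) (l : List String) : Nat :=
  ((cumsFrom t l).takeWhile (fun c => decide (c < m))).length

lemma cumsB_eq (l : List String) : ∀ (acc : List Int) (t : Int),
    (l.foldl (fun (st : List Int × Int) line =>
      let total := st.2 + ((PySem.Str.split₀ line).length : Int)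
      (st.1 ++ [total], total)) (acc, t)).1 = acc ++ cumsFrom t l := by
  induction l with
  | nil => intro acc t; simp [cumsFrom]
  | cons line rest ih =>
      intro acc t
      simp only [List.foldl_cons, cumsFrom]
      rw [ih]
      simp

lemma foldl_stepA_frozen (m : Int) (sents : List String) :
    ∀ (acc : List String) (t : Int), m ≤ t →
      (sents.foldl (stepA m) (acc, t)).1 = acc := by
  induction sents with
  | nil => intro acc t h; rfl
  | cons line rest ih =>
      intro acc t h
      have hw : (0 : Int) ≤ ((PySem.Str.split₀ line).length : Int) := by positivity
      simp only [List.foldl_cons, stepA]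
      rw [if_neg (by omega)]
      exact ih acc _ (by omega)

lemma foldl_eq_take (m : Int) (sents : List String) :
    ∀ (acc : List String) (t : Int),
      (sents.foldl (stepA m) (acc, t)).1 = acc ++ sents.take (kf m t sents) := by
  induction sents with
  | nil => intro acc t; simp [kf, cumsFrom]
  | cons line rest ih =>
      intro acc t
      simp only [List.foldl_cons, stepA]
      by_cases h : t + ((PySem.Str.split₀ line).length : Int) < m
      · rw [if_pos h, ih]
        have : kf m t (line :: rest)
            = kf m (t + ((PySem.Str.split₀ line).length : Int)) rest + 1 := by
          simp [kf, cumsFrom, h]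
        simp [this, List.take_succ_cons]
      · rw [if_neg h, foldl_stepA_frozen m rest acc _ (by omega)]
        have : kf m t (line :: rest) = 0 := by
          simp [kf, cumsFrom, h]
        simp [this]

lemma cumsFrom_ge (t : Int) (l : List String) :
    ∀ x ∈ cumsFrom t l, t ≤ x := by
  induction l generalizing t with
  | nil => simp [cumsFrom]
  | cons line rest ih =>
      intro x hx
      have hw : (0 : Int) ≤ ((PySem.Str.split₀ line).length : Int) := by positivity
      simp only [cumsFrom, List.mem_cons] at hx
      rcases hx with h | h
      · omega
      · have := ih _ x h; omega

lemma kf_le_length (m t : Int) (l : List String) : kf m t l ≤ (cumsFrom t l).length :=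
  (List.takeWhile_sublist _).length_le

lemma getD_lt_of_lt_kf (m : Int) (l : List String) :
    ∀ (t : Int) (i : Nat), i < kf m t l → (cumsFrom t l).getD i 0 < m := by
  induction l with
  | nil => intro t i h; simp [kf, cumsFrom] at h
  | cons line rest ih =>
      intro t i h
      by_cases hc : t + ((PySem.Str.split₀ line).length : Int) < m
      · have hk : kf m t (line :: rest)
            = kf m (t + ((PySem.Str.split₀ line).length : Int)) rest + 1 := by
          simp [kf, cumsFrom, hc]
        cases i with
        | zero => simpa [cumsFrom] using hc
        | succ i =>
            rw [hk] at h
            simpa [cumsFrom] using ih _ i (by omega)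
      · have hk : kf m t (line :: rest) = 0 := by
          simp [kf, cumsFrom, hc]
        omega

lemma lt_kf_of_getD_lt (m : Int) (l : List String) :
    ∀ (t : Int) (i : Nat), i < (cumsFrom t l).length →
      (cumsFrom t l).getD i 0 < m → i < kf m t l := by
  induction l with
  | nil => intro t i h; simp [cumsFrom] at h
  | cons line rest ih =>
      intro t i hi hlt
      cases i with
      | zero =>
          have h0 : t + ((PySem.Str.split₀ line).length : Int) < m := by
            simpa [cumsFrom] using hlt
          have : kf m t (line :: rest)
              = kf m (t + ((PySem.Str.split₀ line).length : Int)) rest + 1 := by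
            simp [kf, cumsFrom, h0]
          omega
      | succ i =>
          have hi' : i < (cumsFrom (t + ((PySem.Str.split₀ line).length : Int)) rest).length := by
            simpa [cumsFrom] using hi
          have hlt' : (cumsFrom (t + ((PySem.Str.split₀ line).length : Int)) rest).getD i 0 < m := by
            simpa [cumsFrom] using hlt
          have hmem : (cumsFrom (t + ((PySem.Str.split₀ line).length : Int)) rest).getD i 0
              ∈ cumsFrom (t + ((PySem.Str.split₀ line).length : Int)) rest := by
            rw [List.getD_eq_getElem _ _ hi']
            exact List.getElem_mem _
          have h0 : t + ((PySem.Str.split₀ line).length : Int) < m :=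
            lt_of_le_of_lt (cumsFrom_ge _ rest _ hmem) hlt'
          have : kf m t (line :: rest)
              = kf m (t + ((PySem.Str.split₀ line).length : Int)) rest + 1 := by
            simp [kf, cumsFrom, h0]
          have := ih _ i hi' hlt'
          omega

lemma bsearch_eq (m t : Int) (l : List String) :
    ∀ (n lo hi : Nat), hi - lo ≤ n → lo ≤ kf m t l → kf m t l ≤ hi →
      hi ≤ (cumsFrom t l).length → bsearch m (cumsFrom t l) lo hi = kf m t l := by
  intro n
  induction n with
  | zero =>
      intro lo hi h1 h2 h3 h4
      rw [bsearch, dif_neg (by omega)]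
      omega
  | succ n ih =>
      intro lo hi h1 h2 h3 h4
      by_cases hlh : lo < hi
      · rw [bsearch, dif_pos hlh]
        simp only
        set mid := (lo + hi) / 2 with hmid
        have hml : lo ≤ mid := by omega
        have hmh : mid < hi := by omega
        by_cases hc : (cumsFrom t l).getD mid 0 < m
        · rw [if_pos hc]
          have : mid < kf m t l := lt_kf_of_getD_lt m l t mid (by omega) hc
          exact ih (mid + 1) hi (by omega) (by omega) h3 h4
        · rw [if_neg hc]
          have : ¬ (mid < kf m t l) := fun h => hc (getD_lt_of_lt_kf m l t mid h)
          exact ih lo mid (by omega) h2 (by omega) (by omega)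
      · rw [bsearch, dif_neg hlh]
        omega

theorem cut_by_length_eq (doc : String) (max_length : Int) :
    cut_by_length doc max_length = cut_by_length_alt doc max_length := by
  show PySem.Str.join "\t"
      (List.foldl (stepA max_length) ([], 0) ((PySem.Str.split? doc "\t").getD [])).1
    = _
  set sents := (PySem.Str.split? doc "\t").getD [] with hs
  rw [foldl_eq_take]
  unfold cut_by_length_alt
  simp only
  rw [← hs, cumsB_eq sents [] 0]
  simp only [List.nil_append]
  have hb : bsearch max_length (cumsFrom 0 sents) 0 (cumsFrom 0 sents).length
      = kf max_length 0 sents :=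
    bsearch_eq max_length 0 sents (cumsFrom 0 sents).length 0 _ (by omega)
      (Nat.zero_le _) (kf_le_length _ _ _) le_rfl
  rw [hb, PySem.List.slice_to _ (by positivity)]
  simp

-- ===== VERDICT (by name: the statement is the Claim_ definition above) =====
theorem cut_by_length_spec : Claim_equal_cut_by_length := by
  intro doc max_length _
  exact cut_by_length_eq doc max_length
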